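-- pv_equiv track=rewrite | github.com/Carlosmtp/proyecto-ada | solucion1.py | participacion_animales
-- ===== SOURCE A (Python) =====
-- def participacion_animales(apertura):
--     participacion = {}
--     for i in range(len(apertura)):
--         for j in range(len(apertura[i])):
--             if apertura[i][j] in participacion:
--                 participacion[apertura[i][j]] += 2
--             else:
--                 participacion[apertura[i][j]] = 2
--     return participacion
-- ===== SOURCE B (Python) =====
-- def participacion_animales(apertura):
--     # Pass 1: collect the distinct elements in first-encounter order (no counting).
--     vistos = set()
--     orden = []
--     for fila in apertura:
--         for x in fila:
--             if x not in vistos: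
--                 vistos.add(x)
--                 orden.append(x)
--     # Pass 2: for each distinct key, count its occurrences by scanning every row.
--     return {x: 2 * sum(fila.count(x) for fila in apertura) for x in orden}
-- ===== Notes on version B (the rewrite author's own statement) =====
-- stated objective: alternative
-- what changed: A keeps a running dict of counts incremented by 2 in one fused nested loop; B maintains no counts at all during traversal: it first collects the distinct keys in first-encounter order with a set+list, then computes each key's total by per-key list.count scans over all rows.
import Mathlib
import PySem

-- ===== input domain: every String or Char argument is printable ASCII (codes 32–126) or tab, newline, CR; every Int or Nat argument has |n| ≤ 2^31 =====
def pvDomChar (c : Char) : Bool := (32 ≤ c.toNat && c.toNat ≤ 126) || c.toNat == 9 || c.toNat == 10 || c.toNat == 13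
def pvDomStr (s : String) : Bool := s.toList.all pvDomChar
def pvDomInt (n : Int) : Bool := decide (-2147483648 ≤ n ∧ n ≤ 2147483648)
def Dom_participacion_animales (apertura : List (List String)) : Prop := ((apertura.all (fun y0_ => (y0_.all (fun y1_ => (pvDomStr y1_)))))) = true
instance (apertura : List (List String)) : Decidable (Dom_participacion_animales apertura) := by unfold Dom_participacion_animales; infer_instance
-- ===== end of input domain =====

-- B replaces A's running count-dict (fused increment-by-2) by two unrelated passes: collect the
-- distinct keys in first-encounter order (set + list, no counts), then count each key with
-- per-key list.count scans over all rows (objective: alternative; not faster).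
-- ===== PORT A =====
def participacion_animales (apertura : List (List String)) : List (String × Int) :=
  ((PySem.List.pyRange 0 (PySem.List.len apertura) 1).foldl (fun d i =>
    let fila := PySem.List.pyGetD apertura i []
    (PySem.List.pyRange 0 (PySem.List.len fila) 1).foldl (fun d j =>
      let x := PySem.List.pyGetD fila j ""
      if d.contains x then d.modify x 0 (· + 2) else d.insert x 2) d)
    PySem.Dict.empty).items

-- ===== PORT B =====
def participacion_animales_alt (apertura : List (List String)) : List (String × Int) :=
  let vo := apertura.foldl (fun acc fila =>
      fila.foldl (fun (acc : PySem.Set String × List String) x =>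
        if PySem.Set.contains acc.1 x then acc
        else (PySem.Set.add acc.1 x, acc.2 ++ [x])) acc)
    (PySem.Set.empty, [])
  vo.2.map (fun x =>
    (x, 2 * apertura.foldl (fun s fila => s + (PySem.List.count fila x : Int)) 0))

-- ===== PRECONDITION & SPEC =====
def Spec_participacion_animales (apertura : List (List String)) (out : List (String × Int)) : Prop := out = participacion_animales_alt apertura
instance (apertura : List (List String)) (out : List (String × Int)) : Decidable (Spec_participacion_animales apertura out) := by unfold Spec_participacion_animales; infer_instance

-- ===== CLAIM (what is proved, stated in full; the proofs are below) =====
def Claim_equal_participacion_animales : Prop := ∀ (apertura : List (List String)), Dom_participacion_animales apertura → Spec_participacion_animales apertura (participacion_animales apertura)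

-- ===== LEMMAS AND PROOFS =====

/-- Double every value of a dict (keys and order unchanged). -/
def pvDouble (d : PySem.Dict String Int) : PySem.Dict String Int :=
  PySem.Dict.mk (d.items.map (fun p => (p.1, 2 * p.2)))

lemma stepA_eq_modify (d : PySem.Dict String Int) (x : String) :
    (if d.contains x then d.modify x 0 (· + 2) else d.insert x 2) = d.modify x 0 (· + 2) := by
  by_cases h : d.contains x = true
  · simp [h]
  · simp only [Bool.not_eq_true] at h
    simp [h, PySem.Dict.modify, PySem.Dict.getD_of_not_contains d 0 h]

lemma contains_double (d : PySem.Dict String Int) (x : String) :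
    (pvDouble d).contains x = d.contains x := by
  simp [pvDouble, PySem.Dict.contains, List.any_map, Function.comp_def]

lemma getD_double (d : PySem.Dict String Int) (x : String) :
    (pvDouble d).getD x 0 = 2 * d.getD x 0 := by
  obtain ⟨items⟩ := d
  induction items with
  | nil => rfl
  | cons p ps ih =>
    by_cases h : p.1 == x
    · simp [pvDouble, PySem.Dict.getD, PySem.Dict.get?, h]
    · simpa [pvDouble, PySem.Dict.getD, PySem.Dict.get?, h] using ih

lemma insert_double (d : PySem.Dict String Int) (x : String) (v : Int) :
    pvDouble (d.insert x v) = (pvDouble d).insert x (2 * v) := by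
  by_cases h : d.contains x = true
  · simp only [PySem.Dict.insert, contains_double, h, if_true]
    apply PySem.Dict.ext
    simp only [pvDouble, List.map_map]
    refine List.map_congr_left (fun p _ => ?_)
    by_cases hp : p.1 = x <;> simp [hp]
  · simp only [PySem.Dict.insert, contains_double, h, Bool.false_eq_true, if_false]
    apply PySem.Dict.ext
    simp [pvDouble]

lemma double_modify (d : PySem.Dict String Int) (x : String) :
    pvDouble (d.modify x 0 (· + 1)) = (pvDouble d).modify x 0 (· + 2) := by
  simp only [PySem.Dict.modify, insert_double, getD_double]
  ring_nf

lemma double_foldl (xs : List String) (d : PySem.Dict String Int) :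
    xs.foldl (fun d x => d.modify x 0 (· + 2)) (pvDouble d)
      = pvDouble (xs.foldl (fun d x => d.modify x 0 (· + 1)) d) := by
  induction xs generalizing d with
  | nil => rfl
  | cons y ys ih => simp only [List.foldl_cons, ← double_modify, ih]

/-- A's result, reduced to a fold over the flattened input. -/
lemma A_eq_flat (apertura : List (List String)) :
    participacion_animales apertura
      = ((apertura.flatten.foldl (fun d x => d.modify x 0 (· + 2)) PySem.Dict.empty)).items := by
  have hinner : ∀ (fila : List String) (d : PySem.Dict String Int),
      (PySem.List.pyRange 0 (PySem.List.len fila) 1).foldl (fun d j =>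
        let x := PySem.List.pyGetD fila j ""
        if d.contains x then d.modify x 0 (· + 2) else d.insert x 2) d
      = fila.foldl (fun d x =>
          if d.contains x then d.modify x 0 (· + 2) else d.insert x 2) d :=
    fun fila d => PySem.List.foldl_pyRange_zero_pyGetD fila ""
      (fun d x => if d.contains x then d.modify x 0 (· + 2) else d.insert x 2) d
  calc participacion_animales apertura
      = (apertura.foldl (fun d fila =>
          (PySem.List.pyRange 0 (PySem.List.len fila) 1).foldl (fun d j =>
            let x := PySem.List.pyGetD fila j ""
            if d.contains x then d.modify x 0 (· + 2) else d.insert x 2) d)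
          PySem.Dict.empty).items :=
        congrArg PySem.Dict.items
          (PySem.List.foldl_pyRange_zero_pyGetD apertura []
            (fun (d : PySem.Dict String Int) (fila : List String) =>
              (PySem.List.pyRange 0 (PySem.List.len fila) 1).foldl (fun d j =>
                let x := PySem.List.pyGetD fila j ""
                if d.contains x then d.modify x 0 (· + 2) else d.insert x 2) d)
            PySem.Dict.empty)
    _ = (apertura.foldl (fun d fila => fila.foldl (fun d x =>
          if d.contains x then d.modify x 0 (· + 2) else d.insert x 2) d)
          PySem.Dict.empty).items :=
        congrArg (fun g => (List.foldl g PySem.Dict.empty apertura).items)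
          (funext fun d => funext fun fila => hinner fila d)
    _ = (apertura.flatten.foldl (fun d x =>
          if d.contains x then d.modify x 0 (· + 2) else d.insert x 2)
          PySem.Dict.empty).items :=
        congrArg PySem.Dict.items (List.foldl_flatten ..).symm
    _ = (apertura.flatten.foldl (fun d x => d.modify x 0 (· + 2)) PySem.Dict.empty).items :=
        congrArg (fun g => (List.foldl g PySem.Dict.empty apertura.flatten).items)
          (funext fun d => funext fun x => stepA_eq_modify d x)

/-- B's key-collecting pair fold keeps both components equal: it IS the Set.add fold. -/
lemma pairfold (l : List String) (s : List String) :
    l.foldl (fun acc x =>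
        if PySem.Set.contains acc.1 x then acc
        else (PySem.Set.add acc.1 x, acc.2 ++ [x])) (s, s)
      = (l.foldl PySem.Set.add s, l.foldl PySem.Set.add s) := by
  induction l generalizing s with
  | nil => rfl
  | cons y ys ih =>
    have hstep : (if PySem.Set.contains s y then ((s, s) : PySem.Set String × List String)
        else (PySem.Set.add s y, s ++ [y])) = (PySem.Set.add s y, PySem.Set.add s y) := by
      by_cases h : PySem.Set.contains s y = true
      · rw [if_pos h, PySem.Set.add, if_pos h]
      · rw [if_neg h, PySem.Set.add, if_neg h]
    simp only [List.foldl_cons, hstep, ih]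

-- ===== VERDICT (by name: the statement is the Claim_ definition above) =====
theorem participacion_animales_spec : Claim_equal_participacion_animales := by
  intro apertura _
  show participacion_animales apertura = participacion_animales_alt apertura
  rw [A_eq_flat]
  -- A side: the modify-by-2 fold is the doubled Counter of the flattened list
  have hA : (apertura.flatten.foldl (fun d x => d.modify x 0 (· + 2)) PySem.Dict.empty).items
      = (PySem.Set.ofList apertura.flatten).map
          (fun k => (k, 2 * (apertura.flatten.count k : Int))) := by
    have h0 : (PySem.Dict.empty : PySem.Dict String Int) = pvDouble PySem.Dict.empty := rfl
    rw [h0, double_foldl, ← PySem.Dict.counter_eq_foldl]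
    show (PySem.Dict.counter apertura.flatten).items.map (fun p => (p.1, 2 * p.2))
        = (PySem.Set.ofList apertura.flatten).map
            (fun k => (k, 2 * (apertura.flatten.count k : Int)))
    rw [PySem.Dict.items_counter, List.map_map]
    rfl
  rw [hA]
  -- B side
  have hB : participacion_animales_alt apertura
      = (apertura.foldl (fun acc fila =>
          fila.foldl (fun (acc : PySem.Set String × List String) x =>
            if PySem.Set.contains acc.1 x then acc
            else (PySem.Set.add acc.1 x, acc.2 ++ [x])) acc)
          (PySem.Set.empty, [])).2.map (fun x =>
            (x, 2 * apertura.foldl (fun s fila => s + (PySem.List.count fila x : Int)) 0)) := rfl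
  rw [hB]
  have hkeys : (apertura.foldl (fun acc fila =>
      fila.foldl (fun (acc : PySem.Set String × List String) x =>
        if PySem.Set.contains acc.1 x then acc
        else (PySem.Set.add acc.1 x, acc.2 ++ [x])) acc)
      (PySem.Set.empty, [])).2 = PySem.Set.ofList apertura.flatten := by
    have := List.foldl_flatten (f := fun (acc : PySem.Set String × List String) x =>
        if PySem.Set.contains acc.1 x then acc
        else (PySem.Set.add acc.1 x, acc.2 ++ [x]))
      (b := ((PySem.Set.empty : PySem.Set String), ([] : List String))) (L := apertura)
    rw [← this, show ((PySem.Set.empty : PySem.Set String), ([] : List String))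
          = (([] : List String), ([] : List String)) from rfl,
        pairfold, PySem.Set.ofList_eq_foldl]
  rw [hkeys]
  refine List.map_congr_left (fun k _ => ?_)
  rw [PySem.List.foldl_add]
  congr 1
  rw [show (fun fila : List String => (PySem.List.count fila k : Int))
        = fun fila : List String => ((fila.count k : Nat) : Int) from
      funext fun fila => by rw [PySem.List.count_eq]]
  rw [show apertura.flatten.count k = (apertura.map (fun f => f.count k)).sum from by
      simp [List.count_flatten]]
  push_cast
  simp [Function.comp_def]
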